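-- pv_equiv track=rewrite | github.com/anatolegosset/Project_Euler | test.py | modified_generate_divisors_under
-- ===== SOURCE A (Python) =====
-- def modified_generate_divisors_under(n, include_self=True, include_1=True, to_sort=True):
--     result = [[] for _ in range(n + 1)]
--     min_i = 1
--     min_j = 1
--     if not include_1:
--         min_i += 1
--     if not include_self:
--         min_j += 1
--
--     for i in range(min_i, n + 1):
--         product = i * min_j
--         bound = min(n, 3 * i * i)
--         while product <= bound:
--             result[product].append(i)
--             product += i
--
--     return result
-- ===== SOURCE B (Python) =====
-- def modified_generate_divisors_under(n, include_self=True, include_1=True, to_sort=True):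
--     min_i = 1 if include_1 else 2
--     min_j = 1 if include_self else 2
--     result = [[] for _ in range(n + 1)]
--     # cofactor-major sieve: for k = i*j, the test 3*i*i >= k is exactly j <= 3*i,
--     # i.e. i >= ceil(j/3); descending j makes each row collect its i's in ascending order
--     for j in range(n, min_j - 1, -1):
--         for i in range(max(min_i, (j + 2) // 3), n // j + 1):
--             result[i * j].append(i)
--     return result
-- ===== Notes on version B (the rewrite author's own statement) =====
-- stated objective: alternative
-- what changed: Replaced A's divisor-major sieve (ascending i, while-loop pushing i into result[i*j] up to min(n,3*i*i)) with a cofactor-major sieve: iterate the cofactor j descending and an arithmetically bounded inner i-range, using the identity 3*i*i >= i*j iff j <= 3*i, so each row still collects its divisors in ascending order without sorting.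
import Mathlib
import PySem

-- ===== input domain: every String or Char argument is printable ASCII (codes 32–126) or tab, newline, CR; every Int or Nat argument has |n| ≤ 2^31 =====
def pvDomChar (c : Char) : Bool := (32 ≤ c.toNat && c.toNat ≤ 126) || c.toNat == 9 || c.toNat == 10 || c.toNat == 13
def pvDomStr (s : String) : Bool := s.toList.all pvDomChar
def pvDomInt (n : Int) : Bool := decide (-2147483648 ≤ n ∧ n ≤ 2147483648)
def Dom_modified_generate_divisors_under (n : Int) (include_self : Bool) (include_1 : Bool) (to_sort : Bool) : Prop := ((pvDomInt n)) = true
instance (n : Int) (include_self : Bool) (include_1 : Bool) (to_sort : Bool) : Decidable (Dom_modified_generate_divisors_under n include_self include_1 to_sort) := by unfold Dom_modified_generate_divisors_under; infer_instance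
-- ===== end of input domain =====

-- B replaces A's divisor-major sieve by a cofactor-major sieve (descending cofactor j, arithmetically
-- bounded inner i-range via 3*i*i ≥ i*j ↔ j ≤ 3*i); same return value, same asymptotic cost.

-- ===== PORT A =====
-- result[idx].append(v); in both programs the index is in range whenever it is executed
def pvAppendAt (res : List (List Int)) (idx : Int) (v : Int) : List (List Int) :=
  res.set idx.toNat (res.getD idx.toNat [] ++ [v])

-- A's 'while product <= bound' loop; the '1 ≤ i' guard only ensures termination (A calls it with i ≥ min_i ≥ 1)
def pvInner (res : List (List Int)) (i product bound : Int) : List (List Int) :=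
  if h : product ≤ bound ∧ 1 ≤ i then
    pvInner (pvAppendAt res product i) i (product + i) bound
  else res
termination_by (bound + 1 - product).toNat
decreasing_by omega

def modified_generate_divisors_under (n : Int) (include_self : Bool) (include_1 : Bool) (to_sort : Bool) : List (List Int) :=
  let result := (PySem.List.pyRange 0 (n + 1) 1).map (fun _ => ([] : List Int))
  let min_i : Int := if include_1 then 1 else 1 + 1
  let min_j : Int := if include_self then 1 else 1 + 1
  (PySem.List.pyRange min_i (n + 1) 1).foldl
    (fun res i => pvInner res i (i * min_j) (min n (3 * i * i))) result

-- ===== PORT B =====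
def modified_generate_divisors_under_alt (n : Int) (include_self : Bool) (include_1 : Bool) (to_sort : Bool) : List (List Int) :=
  let min_i : Int := if include_1 then 1 else 2
  let min_j : Int := if include_self then 1 else 2
  let result := (PySem.List.pyRange 0 (n + 1) 1).map (fun _ => ([] : List Int))
  (PySem.List.pyRange n (min_j - 1) (-1)).foldl (fun result j =>
    (PySem.List.pyRange (max min_i (PySem.Int.floordiv (j + 2) 3)) (PySem.Int.floordiv n j + 1) 1).foldl
      (fun result i => pvAppendAt result (i * j) i) result) result

-- ===== PRECONDITION & SPEC =====
def Spec_modified_generate_divisors_under (n : Int) (include_self : Bool) (include_1 : Bool) (to_sort : Bool) (out : List (List Int)) : Prop := out = modified_generate_divisors_under_alt n include_self include_1 to_sort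
instance (n : Int) (include_self : Bool) (include_1 : Bool) (to_sort : Bool) (out : List (List Int)) : Decidable (Spec_modified_generate_divisors_under n include_self include_1 to_sort out) := by unfold Spec_modified_generate_divisors_under; infer_instance

-- ===== CLAIM (what is proved, stated in full; the proofs are below) =====
def Claim_equal_modified_generate_divisors_under : Prop := ∀ (n : Int) (include_self : Bool) (include_1 : Bool) (to_sort : Bool), Dom_modified_generate_divisors_under n include_self include_1 to_sort → Spec_modified_generate_divisors_under n include_self include_1 to_sort (modified_generate_divisors_under n include_self include_1 to_sort)

-- ===== LEMMAS AND PROOFS =====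

theorem pvAppendAt_length (res : List (List Int)) (idx v : Int) :
    (pvAppendAt res idx v).length = res.length := by
  simp [pvAppendAt]

theorem pvAppendAt_getD (res : List (List Int)) (idx v : Int) (h0 : 0 ≤ idx) (t : Nat) :
    (pvAppendAt res idx v).getD t [] =
      res.getD t [] ++ (if ((t : Int) = idx ∧ t < res.length) then [v] else []) := by
  unfold pvAppendAt
  rcases Nat.lt_or_ge t res.length with ht | ht
  · rw [List.getD_eq_getElem _ _ (by simpa using ht), List.getD_eq_getElem _ _ ht,
      List.getElem_set]
    by_cases he : idx.toNat = t
    · have hti : (t : Int) = idx := by omega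
      simp [he, hti, ht, List.getD_eq_getElem _ _ (by omega : idx.toNat < res.length)]
    · have hti : ¬ ((t : Int) = idx) := by omega
      simp [he, hti]
  · rw [List.getD_eq_default _ _ (by simpa using ht), List.getD_eq_default _ _ ht]
    simp [show ¬ t < res.length by omega]

theorem pvInner_length (res : List (List Int)) (i p b : Int) :
    (pvInner res i p b).length = res.length := by
  induction res, p using pvInner.induct i b with
  | case1 res p h ih => rw [pvInner, dif_pos h, ih, pvAppendAt_length]
  | case2 res p h => rw [pvInner, dif_neg h]

theorem pvInner_getD (res : List (List Int)) (i p b : Int) (hi : 1 ≤ i) (hp : 0 ≤ p)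
    (hd : i ∣ p) (t : Nat) :
    (pvInner res i p b).getD t [] =
      res.getD t [] ++ (if (p ≤ (t : Int) ∧ (t : Int) ≤ b ∧ i ∣ (t : Int) ∧ t < res.length) then [i] else []) := by
  induction res, p using pvInner.induct i b with
  | case1 res p h ih =>
    rw [pvInner, dif_pos h]
    rw [ih (by omega) (Dvd.dvd.add hd ⟨1, by ring⟩)]
    rw [pvAppendAt_getD res p i (by omega)]
    rw [pvAppendAt_length]
    by_cases ht : (t : Int) = p ∧ t < res.length
    · have h1 : ¬ (p + i ≤ (t : Int)) := by omega
      have h2 : p ≤ (t : Int) ∧ (t : Int) ≤ b ∧ i ∣ (t : Int) ∧ t < res.length := by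
        refine ⟨by omega, by omega, ?_, ht.2⟩
        rw [ht.1]; exact hd
      rw [if_pos ht, if_pos h2, if_neg (fun hc => h1 hc.1), List.append_nil]
    · have h2 : (p + i ≤ (t : Int) ∧ (t : Int) ≤ b ∧ i ∣ (t : Int) ∧ t < res.length) ↔
          (p ≤ (t : Int) ∧ (t : Int) ≤ b ∧ i ∣ (t : Int) ∧ t < res.length) := by
        constructor
        · rintro ⟨h1, h2', h3, h4⟩; exact ⟨by omega, h2', h3, h4⟩
        · rintro ⟨h1, h2', h3, h4⟩
          refine ⟨?_, h2', h3, h4⟩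
          rcases h3 with ⟨a, ha⟩; rcases hd with ⟨c, hc⟩
          have hne : (t : Int) ≠ p := fun he => ht ⟨he, h4⟩
          have hca : i * c ≤ i * a := by rw [← hc, ← ha]; exact h1
          have hca' : c ≤ a := le_of_mul_le_mul_left hca (by omega)
          have hane : a ≠ c := by rintro rfl; exact hne (by rw [ha, hc])
          have h5 : c + 1 ≤ a := by omega
          calc p + i = i * (c + 1) := by rw [hc]; ring
            _ ≤ i * a := by
                apply mul_le_mul_of_nonneg_left h5 (by omega)
            _ = (t : Int) := ha.symm
      simp only [ht, if_false, if_neg (by tauto), List.append_nil] at *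
      rw [if_congr h2 rfl rfl]
  | case2 res p h =>
    rw [pvInner, dif_neg h]
    have : ¬ (p ≤ (t : Int) ∧ (t : Int) ≤ b ∧ i ∣ (t : Int) ∧ t < res.length) := by
      intro ⟨h1, h2, _, _⟩; exact h ⟨by omega, hi⟩
    simp [this]

theorem pvFold_length (L : List Int) (mj n : Int) (res : List (List Int)) :
    (L.foldl (fun res i => pvInner res i (i * mj) (min n (3 * i * i))) res).length = res.length := by
  induction L generalizing res with
  | nil => rfl
  | cons i L ih => rw [List.foldl_cons, ih, pvInner_length]

theorem pvFold_getD (L : List Int) (mj n : Int) (hmj : 1 ≤ mj) (res : List (List Int))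
    (hL : ∀ i ∈ L, 1 ≤ i) (t : Nat) :
    (L.foldl (fun res i => pvInner res i (i * mj) (min n (3 * i * i))) res).getD t [] =
      res.getD t [] ++ L.filter (fun i =>
        decide (i * mj ≤ (t : Int) ∧ (t : Int) ≤ min n (3 * i * i) ∧ i ∣ (t : Int) ∧ t < res.length)) := by
  induction L generalizing res with
  | nil => simp
  | cons i L ih =>
    have hi : 1 ≤ i := hL i List.mem_cons_self
    rw [List.foldl_cons, ih _ (fun j hj => hL j (List.mem_cons_of_mem _ hj)),
      pvInner_length,
      pvInner_getD res i (i * mj) (min n (3 * i * i)) hi (by nlinarith) ⟨mj, rfl⟩ t,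
      List.filter_cons, List.append_assoc]
    by_cases hc : i * mj ≤ (t : Int) ∧ (t : Int) ≤ min n (3 * i * i) ∧ i ∣ (t : Int) ∧ t < res.length
    · rw [if_pos hc, if_pos (by simpa using hc)]
      simp
    · rw [if_neg hc, if_neg (by simpa using hc)]
      simp

theorem pvInnerB_length (l : List Int) (j : Int) (res : List (List Int)) :
    (l.foldl (fun res i => pvAppendAt res (i * j) i) res).length = res.length := by
  induction l generalizing res with
  | nil => rfl
  | cons i l ih => rw [List.foldl_cons, ih, pvAppendAt_length]

theorem pvInnerB_getD (j lo hi : Int) (hj : 1 ≤ j) (hlo : 1 ≤ lo)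
    (res : List (List Int)) (t : Nat) :
    ((PySem.List.pyRange lo hi 1).foldl (fun res i => pvAppendAt res (i * j) i) res).getD t [] =
      res.getD t [] ++
        (if (j ∣ (t : Int) ∧ lo ≤ (t : Int) / j ∧ (t : Int) / j < hi ∧ t < res.length)
          then [(t : Int) / j] else []) := by
  by_cases hrange : hi ≤ lo
  · rw [PySem.List.pyRange_one_eq_nil hrange, List.foldl_nil,
      if_neg (by rintro ⟨-, h1, h2, -⟩; omega), List.append_nil]
  · have hlt : lo < hi := by omega
    rw [PySem.List.pyRange_one_cons hlt, List.foldl_cons]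
    rw [pvInnerB_getD j (lo + 1) hi hj (by omega) _ t]
    rw [pvAppendAt_getD res (lo * j) lo (by positivity) t, pvAppendAt_length]
    by_cases ht : (t : Int) = lo * j ∧ t < res.length
    · have hdvd : j ∣ (t : Int) := ⟨lo, by rw [ht.1]; ring⟩
      have hq : (t : Int) / j = lo := by rw [ht.1, Int.mul_ediv_cancel _ (by omega)]
      rw [if_pos ht, if_neg (by rintro ⟨-, h1, -, -⟩; omega),
        if_pos ⟨hdvd, by omega, by omega, ht.2⟩, List.append_nil, hq]
    · rw [if_neg ht, List.append_nil]
      have hiff : (j ∣ (t : Int) ∧ lo + 1 ≤ (t : Int) / j ∧ (t : Int) / j < hi ∧ t < res.length) ↔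
          (j ∣ (t : Int) ∧ lo ≤ (t : Int) / j ∧ (t : Int) / j < hi ∧ t < res.length) := by
        constructor
        · rintro ⟨h1, h2, h3, h4⟩; exact ⟨h1, by omega, h3, h4⟩
        · rintro ⟨h1, h2, h3, h4⟩
          refine ⟨h1, ?_, h3, h4⟩
          rcases eq_or_lt_of_le h2 with he | hl
          · exfalso
            exact ht ⟨by rw [← Int.ediv_mul_cancel h1, ← he], h4⟩
          · omega
      rw [if_congr hiff rfl rfl]
termination_by (hi - lo).toNat
decreasing_by omega

theorem pvOuterB_length (L : List Int) (mi n : Int) (res : List (List Int)) :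
    (L.foldl (fun res j =>
      (PySem.List.pyRange (max mi (PySem.Int.floordiv (j + 2) 3)) (PySem.Int.floordiv n j + 1) 1).foldl
        (fun res i => pvAppendAt res (i * j) i) res) res).length = res.length := by
  induction L generalizing res with
  | nil => rfl
  | cons j L ih => rw [List.foldl_cons, ih, pvInnerB_length]

theorem pvOuterB_getD (L : List Int) (mi n : Int) (hmi : 1 ≤ mi) (res : List (List Int))
    (hL : ∀ j ∈ L, 1 ≤ j) (t : Nat) :
    (L.foldl (fun res j =>
      (PySem.List.pyRange (max mi (PySem.Int.floordiv (j + 2) 3)) (PySem.Int.floordiv n j + 1) 1).foldl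
        (fun res i => pvAppendAt res (i * j) i) res) res).getD t [] =
      res.getD t [] ++ (L.filter (fun j =>
        decide (j ∣ (t : Int) ∧ max mi (PySem.Int.floordiv (j + 2) 3) ≤ (t : Int) / j ∧
          (t : Int) / j < PySem.Int.floordiv n j + 1 ∧ t < res.length))).map (fun j => (t : Int) / j) := by
  induction L generalizing res with
  | nil => simp
  | cons j L ih =>
    have hj : 1 ≤ j := hL j List.mem_cons_self
    rw [List.foldl_cons, ih _ (fun j' hj' => hL j' (List.mem_cons_of_mem _ hj')),
      pvInnerB_length,
      pvInnerB_getD j _ _ hj (by omega) res t, List.filter_cons, List.append_assoc]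
    by_cases hc : j ∣ (t : Int) ∧ max mi (PySem.Int.floordiv (j + 2) 3) ≤ (t : Int) / j ∧
        (t : Int) / j < PySem.Int.floordiv n j + 1 ∧ t < res.length
    · rw [if_pos hc, if_pos (by simpa using hc)]
      simp
    · rw [if_neg hc, if_neg (by simpa using hc)]
      simp

theorem pvRows_eq (mi mj n k : Int) (P : Prop) [Decidable P] (hP : P)
    (hmi : 1 ≤ mi) (hmj : 1 ≤ mj) (hk : 0 ≤ k) (hkn : k ≤ n) :
    ((PySem.List.pyRange n (mj - 1) (-1)).filter (fun j =>
        decide (j ∣ k ∧ max mi (PySem.Int.floordiv (j + 2) 3) ≤ k / j ∧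
          k / j < PySem.Int.floordiv n j + 1 ∧ P))).map (fun j => k / j) =
      (PySem.List.pyRange mi (n + 1) 1).filter (fun i =>
        decide (i * mj ≤ k ∧ k ≤ min n (3 * i * i) ∧ i ∣ k ∧ P)) := by
  rw [PySem.List.pyRange_neg_one_eq_reverse, show mj - 1 + 1 = mj by ring,
    List.filter_reverse, List.map_reverse]
  -- membership characterizations
  have hJmem : ∀ j : Int, j ∈ (PySem.List.pyRange mj (n + 1) 1).filter (fun j =>
      decide (j ∣ k ∧ max mi (PySem.Int.floordiv (j + 2) 3) ≤ k / j ∧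
        k / j < PySem.Int.floordiv n j + 1 ∧ P)) ↔
      (mj ≤ j ∧ j < n + 1 ∧ j ∣ k ∧ mi ≤ k / j ∧ j ≤ 3 * (k / j) ∧ (k / j) * j ≤ n) := by
    intro j
    rw [List.mem_filter, PySem.List.mem_pyRange_one, decide_eq_true_eq]
    constructor
    · rintro ⟨⟨h1, h2⟩, h3, h4, h5, -⟩
      have hjpos : (0 : Int) < j := by omega
      rw [PySem.Int.floordiv_eq_ediv_of_pos (by norm_num : (0:Int) < 3)] at h4
      rw [PySem.Int.floordiv_eq_ediv_of_pos hjpos] at h5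
      have hceil : (j + 2) / 3 ≤ k / j := le_trans (le_max_right _ _) h4
      refine ⟨h1, h2, h3, le_trans (le_max_left _ _) h4, by omega, ?_⟩
      have : k / j ≤ n / j := by omega
      exact (Int.le_ediv_iff_mul_le hjpos).mp this
    · rintro ⟨h1, h2, h3, h4, h5, h6⟩
      have hjpos : (0 : Int) < j := by omega
      rw [PySem.Int.floordiv_eq_ediv_of_pos (by norm_num : (0:Int) < 3),
        PySem.Int.floordiv_eq_ediv_of_pos hjpos]
      have h6' : k / j ≤ n / j := (Int.le_ediv_iff_mul_le hjpos).mpr h6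
      exact ⟨⟨h1, h2⟩, h3, by omega, by omega, hP⟩
  have hSmem : ∀ i : Int, i ∈ (PySem.List.pyRange mi (n + 1) 1).filter (fun i =>
      decide (i * mj ≤ k ∧ k ≤ min n (3 * i * i) ∧ i ∣ k ∧ P)) ↔
      (mi ≤ i ∧ i < n + 1 ∧ i * mj ≤ k ∧ k ≤ 3 * i * i ∧ i ∣ k) := by
    intro i
    rw [List.mem_filter, PySem.List.mem_pyRange_one, decide_eq_true_eq, le_min_iff]
    constructor
    · rintro ⟨⟨h1, h2⟩, h3, ⟨-, h4⟩, h5, -⟩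
      exact ⟨h1, h2, h3, h4, h5⟩
    · rintro ⟨h1, h2, h3, h4, h5⟩
      exact ⟨⟨h1, h2⟩, h3, ⟨hkn, h4⟩, h5, hP⟩
  -- basic consequences of the J side
  have hJfacts : ∀ j : Int, (mj ≤ j ∧ j < n + 1 ∧ j ∣ k ∧ mi ≤ k / j ∧ j ≤ 3 * (k / j) ∧ (k / j) * j ≤ n) →
      1 ≤ j ∧ 1 ≤ k / j ∧ (k / j) * j = k := by
    rintro j ⟨h1, h2, h3, h4, h5, h6⟩
    exact ⟨by omega, by omega, Int.ediv_mul_cancel h3⟩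
  apply List.Perm.eq_of_pairwise (le := fun a b => a < b)
  · intro a b _ _ hab hba; omega
  · -- reversed map is strictly increasing
    rw [List.pairwise_reverse, List.pairwise_map]
    apply List.Pairwise.imp_of_mem (fun {a b} ha hb hab => ?_)
      ((PySem.List.pairwise_lt_pyRange_one mj (n + 1)).filter _)
    rw [hJmem] at ha hb
    obtain ⟨ha1, ha2, ha3⟩ := hJfacts a ha
    obtain ⟨hb1, hb2, hb3⟩ := hJfacts b hb
    -- a < b, both divide k: k / b < k / a
    by_contra hle
    push_neg at hle
    nlinarith [hle, hab, ha2, hb2]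
  · exact (PySem.List.pairwise_lt_pyRange_one mi (n + 1)).filter _
  · -- permutation via nodup + same finset
    apply List.perm_of_nodup_nodup_toFinset_eq
    · rw [List.nodup_reverse]
      apply List.Nodup.map_on ?_ ((PySem.List.nodup_pyRange_one mj (n + 1)).filter _)
      intro x hx y hy hxy
      rw [hJmem] at hx hy
      obtain ⟨-, hxq, hx3⟩ := hJfacts x hx
      obtain ⟨-, -, hy3⟩ := hJfacts y hy
      have h := hx3.trans hy3.symm
      rw [← hxy] at h
      exact mul_left_cancel₀ (by omega) h
    · exact (PySem.List.nodup_pyRange_one mi (n + 1)).filter _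
    · apply Finset.ext
      intro i
      rw [List.mem_toFinset, List.mem_toFinset, List.mem_reverse, List.mem_map]
      rw [hSmem]
      constructor
      · rintro ⟨j, hj, rfl⟩
        rw [hJmem] at hj
        obtain ⟨hj1, hj2, hj3⟩ := hJfacts j hj
        obtain ⟨h1, h2, h3, h4, h5, h6⟩ := hj
        refine ⟨h4, by nlinarith, by nlinarith, by nlinarith, ⟨j, hj3.symm⟩⟩
      · rintro ⟨h1, h2, h3, h4, h5⟩
        obtain ⟨j, hkj⟩ := h5
        have hipos : (0 : Int) < i := by omega
        have hjpos : (0 : Int) < j := by nlinarith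
        have hq : k / j = i := by
          rw [hkj]
          exact Int.mul_ediv_cancel _ (by omega)
        refine ⟨j, ?_, hq⟩
        rw [hJmem, hq]
        refine ⟨by nlinarith, by nlinarith, ⟨i, by rw [hkj]; ring⟩, h1, by nlinarith, by omega⟩

theorem pvMain (n mi mj : Int) (hmi : 1 ≤ mi) (hmj : 1 ≤ mj) :
    (PySem.List.pyRange mi (n + 1) 1).foldl
        (fun res i => pvInner res i (i * mj) (min n (3 * i * i)))
        ((PySem.List.pyRange 0 (n + 1) 1).map (fun _ => ([] : List Int))) =
      (PySem.List.pyRange n (mj - 1) (-1)).foldl (fun res j =>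
        (PySem.List.pyRange (max mi (PySem.Int.floordiv (j + 2) 3)) (PySem.Int.floordiv n j + 1) 1).foldl
          (fun res i => pvAppendAt res (i * j) i) res)
        ((PySem.List.pyRange 0 (n + 1) 1).map (fun _ => ([] : List Int))) := by
  set res0 : List (List Int) := (PySem.List.pyRange 0 (n + 1) 1).map (fun _ => ([] : List Int)) with hres0
  apply List.ext_getElem
  · rw [pvFold_length, pvOuterB_length]
  · intro t h1 h2
    have ht : t < res0.length := by rw [pvFold_length] at h1; exact h1
    have htn : (t : Int) ≤ n := by
      have := ht
      rw [hres0, List.length_map, PySem.List.length_pyRange_one] at this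
      omega
    rw [← List.getD_eq_getElem _ [] h1, ← List.getD_eq_getElem _ [] h2]
    rw [pvFold_getD _ _ _ hmj _ (fun i hi => by
      rw [PySem.List.mem_pyRange_one] at hi; omega) t]
    rw [pvOuterB_getD _ mi n hmi _ (fun j hj => by
      rw [PySem.List.mem_pyRange_neg_one] at hj; omega) t]
    have hbase : res0.getD t [] = [] := by
      rw [List.getD_eq_getElem _ [] ht]
      simp [hres0]
    rw [hbase, List.nil_append, List.nil_append]
    exact (pvRows_eq mi mj n (t : Int) (t < res0.length) ht hmi hmj (by omega) htn).symm

-- ===== VERDICT (by name: the statement is the Claim_ definition above) =====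
theorem modified_generate_divisors_under_spec : Claim_equal_modified_generate_divisors_under := by
  intro n include_self include_1 to_sort _
  unfold Spec_modified_generate_divisors_under
  simp only [modified_generate_divisors_under, modified_generate_divisors_under_alt]
  cases include_1 <;> cases include_self <;> simp only [Bool.false_eq_true, if_true, if_false] <;>
    exact pvMain n _ _ (by norm_num) (by norm_num)
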